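-- pv_equiv track=rewrite | github.com/DidierStevens/DidierStevensSuite | 1768.py | StatisticalSearch
-- ===== SOURCE A (Python) =====
-- def CIC(expression):
--     if callable(expression):
--         return expression()
--     else:
--         return expression
--
-- def IFF(expression, valueTrue, valueFalse):
--     if expression:
--         return CIC(valueTrue)
--     else:
--         return CIC(valueFalse)
--
-- def GetChunk(position, data):
--     return [data[:position], data[position:]]
--
-- def StatisticalSearch(payloadsectiondata, key):
--     start = None
--     end = None
--     position = 0
--     while len(payloadsectiondata) > 8:
--         block, payloadsectiondata = GetChunk(8, payloadsectiondata)
--         if sum([IFF(c == key, 1, 0) for c in block]) > 2: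
--             if start == None:
--                 start = position
--                 end = position + 7
--             else:
--                 end = position + 7
--         position += 8
--     return start, end
-- ===== SOURCE B (Python) =====
-- def StatisticalSearch(payloadsectiondata, key):
--     n = len(payloadsectiondata)
--     hits = [i for i in range(0, n - 8, 8)
--             if payloadsectiondata[i:i + 8].count(key) > 2]
--     if hits:
--         return hits[0], hits[-1] + 7
--     return None, None
-- ===== Notes on version B (the rewrite author's own statement) =====
-- stated objective: faster
-- what changed: Replaces A's while-loop that repeatedly re-slices the remaining payload (each GetChunk copies the whole tail) and threads start/end accumulators, by one comprehension over block start indices collecting the qualifying blocks, returning first and last+7.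
import Mathlib
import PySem

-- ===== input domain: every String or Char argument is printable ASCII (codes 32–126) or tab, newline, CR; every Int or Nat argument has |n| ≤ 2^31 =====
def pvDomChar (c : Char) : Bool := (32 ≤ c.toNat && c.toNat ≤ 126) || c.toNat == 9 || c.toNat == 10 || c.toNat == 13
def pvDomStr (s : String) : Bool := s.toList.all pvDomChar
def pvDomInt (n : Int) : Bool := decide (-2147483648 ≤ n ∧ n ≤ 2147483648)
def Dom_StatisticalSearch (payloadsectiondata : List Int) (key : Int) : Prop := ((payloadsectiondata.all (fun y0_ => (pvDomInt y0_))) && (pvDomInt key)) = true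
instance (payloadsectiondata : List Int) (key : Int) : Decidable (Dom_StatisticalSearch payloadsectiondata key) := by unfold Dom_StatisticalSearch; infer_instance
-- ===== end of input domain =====

-- B replaces A's repeated tail-slicing loop (O(n^2) copying) by one comprehension over
-- block start indices plus first/last of the qualifying indices (objective: faster, O(n)).

-- ===== PORT A =====
-- CIC: A only ever passes ints (never callables), so CIC is the identity here.
def pvCIC (x : Int) : Int := x

def pvIFF (b : Bool) (t f : Int) : Int := if b then pvCIC t else pvCIC f

def pvGetChunk (position : Int) (data : List Int) : List Int × List Int :=
  (PySem.List.slice data none (some position), PySem.List.slice data (some position) none)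

def SSloop (key : Int) (data : List Int) (start fin : Option Int) (pos : Int) :
    Option Int × Option Int :=
  if h : data.length > 8 then
    if ((pvGetChunk 8 data).1.map (fun c => pvIFF (c == key) 1 0)).sum > 2 then
      match start with
      | none => SSloop key (pvGetChunk 8 data).2 (some pos) (some (pos + 7)) (pos + 8)
      | some _ => SSloop key (pvGetChunk 8 data).2 start (some (pos + 7)) (pos + 8)
    else SSloop key (pvGetChunk 8 data).2 start fin (pos + 8)
  else (start, fin)
termination_by data.length
decreasing_by
  all_goals
    simp only [pvGetChunk, PySem.List.slice_from _ (by norm_num : (0:Int) ≤ 8)]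
    simp only [List.length_drop]
    omega

def StatisticalSearch (payloadsectiondata : List Int) (key : Int) : Option Int × Option Int :=
  SSloop key payloadsectiondata none none 0

-- ===== PORT B =====
def StatisticalSearch_alt (payloadsectiondata : List Int) (key : Int) : Option Int × Option Int :=
  let n : Int := payloadsectiondata.length
  let hits := (PySem.List.pyRange 0 (n - 8) 8).filter
      (fun i => decide (2 < PySem.List.count
        (PySem.List.slice payloadsectiondata (some i) (some (i + 8))) key))
  match hits with
  | [] => (none, none)
  | h :: t => (some h, some ((h :: t).getLast (List.cons_ne_nil h t) + 7))

-- ===== PRECONDITION & SPEC =====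
def Spec_StatisticalSearch (payloadsectiondata : List Int) (key : Int) (out : Option Int × Option Int) : Prop := out = StatisticalSearch_alt payloadsectiondata key
instance (payloadsectiondata : List Int) (key : Int) (out : Option Int × Option Int) : Decidable (Spec_StatisticalSearch payloadsectiondata key out) := by unfold Spec_StatisticalSearch; infer_instance

-- ===== CLAIM (what is proved, stated in full; the proofs are below) =====
def Claim_equal_StatisticalSearch : Prop := ∀ (payloadsectiondata : List Int) (key : Int), Dom_StatisticalSearch payloadsectiondata key → Spec_StatisticalSearch payloadsectiondata key (StatisticalSearch payloadsectiondata key)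

-- ===== LEMMAS AND PROOFS =====

-- the list of qualifying block start positions, as A discovers them
def pvHits (key : Int) (data : List Int) (pos : Int) : List Int :=
  if h : data.length > 8 then
    if 2 < (data.take 8).count key then
      pos :: pvHits key (data.drop 8) (pos + 8)
    else pvHits key (data.drop 8) (pos + 8)
  else []
termination_by data.length
decreasing_by all_goals simp; omega

-- folding a hit list into A's (start, end) accumulator result
def pvCombine (start fin : Option Int) : List Int → Option Int × Option Int
  | [] => (start, fin)
  | h :: t => (some (start.getD h), some ((h :: t).getLast (List.cons_ne_nil h t) + 7))

lemma pvCombine_some (s e : Int) (hs : List Int) :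
    pvCombine (some s) (some e) hs =
      (some s, match hs with
               | [] => some e
               | h :: t => some ((h :: t).getLast (List.cons_ne_nil h t) + 7)) := by
  cases hs <;> simp [pvCombine]

lemma SSloop_eq (key : Int) (data : List Int) (start fin : Option Int) (pos : Int) :
    SSloop key data start fin pos = pvCombine start fin (pvHits key data pos) := by
  rw [SSloop.eq_def, pvHits.eq_def]
  by_cases h : data.length > 8
  · simp only [h, dif_pos]
    have hblock : (pvGetChunk 8 data).1 = data.take 8 := by
      simp [pvGetChunk, PySem.List.slice_to _ (by norm_num : (0:Int) ≤ 8)]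
    have hrest : (pvGetChunk 8 data).2 = data.drop 8 := by
      simp [pvGetChunk, PySem.List.slice_from _ (by norm_num : (0:Int) ≤ 8)]
    have hsum : ((pvGetChunk 8 data).1.map (fun c => pvIFF (c == key) 1 0)).sum
        = ((data.take 8).count key : Int) := by
      rw [hblock]
      simp only [pvIFF, pvCIC]
      rw [PySem.List.sum_map_ite_one_zero]
      simp [List.count]
    have hcond : (((pvGetChunk 8 data).1.map (fun c => pvIFF (c == key) 1 0)).sum > 2)
        ↔ (2 < (data.take 8).count key) := by
      rw [hsum]; omega
    by_cases hc : 2 < (data.take 8).count key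
    · rw [if_pos (hcond.mpr hc), if_pos hc]
      cases start with
      | none =>
          rw [hrest, SSloop_eq key (data.drop 8) (some pos) (some (pos + 7)) (pos + 8)]
          rw [pvCombine_some]
          cases hhs : pvHits key (data.drop 8) (pos + 8) with
          | nil => simp [pvCombine]
          | cons h' t' => simp [pvCombine, List.getLast_cons]
      | some s =>
          rw [hrest, SSloop_eq key (data.drop 8) (some s) (some (pos + 7)) (pos + 8)]
          rw [pvCombine_some]
          cases hhs : pvHits key (data.drop 8) (pos + 8) with
          | nil => simp [pvCombine]
          | cons h' t' => simp [pvCombine, List.getLast_cons]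
    · rw [if_neg (fun hx => hc (hcond.mp hx)), if_neg hc, hrest]
      exact SSloop_eq key (data.drop 8) start fin (pos + 8)
  · simp [h, pvCombine]
termination_by data.length
decreasing_by all_goals simp; omega

-- splitting a step-8 range at its first element
lemma pyRange8_step (m : Int) (hm : 0 < m) :
    PySem.List.pyRange 0 m 8 = 0 :: (PySem.List.pyRange 0 (m - 8) 8).map (· + 8) := by
  rw [PySem.List.pyRange_of_pos 0 m (by norm_num : (0:Int) < 8),
      PySem.List.pyRange_of_pos 0 (m - 8) (by norm_num : (0:Int) < 8)]
  by_cases h8 : 8 < m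
  · have h1 : (0:Int) < m := hm
    rw [if_pos h1, if_pos (by omega : (0:Int) < m - 8)]
    have hN : ((m - 0 + 8 - 1) / 8).toNat = ((m - 8 - 0 + 8 - 1) / 8).toNat + 1 := by omega
    rw [hN, List.range_succ_eq_map]
    simp only [List.map_cons, List.map_map]
    refine List.cons_eq_cons.mpr ⟨by norm_num, ?_⟩
    apply List.map_congr_left
    intro k _
    simp only [Function.comp_apply]
    push_cast
    ring
  · rw [if_pos hm, if_neg (by omega : ¬ (0:Int) < m - 8)]
    have : ((m - 0 + 8 - 1) / 8).toNat = 1 := by omega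
    rw [this]
    simp

lemma pvHits_eq (key : Int) (data : List Int) (pos : Int) :
    pvHits key data pos =
      ((PySem.List.pyRange 0 ((data.length : Int) - 8) 8).filter
        (fun i => decide (2 < PySem.List.count
          (PySem.List.slice data (some i) (some (i + 8))) key))).map (fun i => pos + i) := by
  rw [pvHits]
  by_cases h : data.length > 8
  · rw [dif_pos h]
    have hL : (0:Int) < (data.length : Int) - 8 := by omega
    rw [pyRange8_step _ hL]
    rw [List.filter_cons]
    have hsl : PySem.List.slice data (some 0) (some ((0:Int) + 8)) = data.take 8 := by
      have h08 : ((0:Int) + 8) = 8 := by norm_num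
      rw [h08, PySem.List.slice_zero_start, PySem.List.slice_to data (by norm_num : (0:Int) ≤ 8)]
      simp
    have hcond0 : (decide (2 < PySem.List.count
        (PySem.List.slice data (some 0) (some (0 + 8))) key)) =
        decide (2 < (data.take 8).count key) := by
      rw [hsl, PySem.List.count_eq]
    rw [hcond0]
    rw [List.filter_map]
    have hfc : ((PySem.List.pyRange 0 ((data.length : Int) - 8 - 8) 8).filter
          ((fun i => decide (2 < PySem.List.count
            (PySem.List.slice data (some i) (some (i + 8))) key)) ∘ (· + 8)))
        = ((PySem.List.pyRange 0 ((data.length : Int) - 8 - 8) 8).filter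
          (fun i => decide (2 < PySem.List.count
            (PySem.List.slice (data.drop 8) (some i) (some (i + 8))) key))) := by
      apply List.filter_congr
      intro i hi
      have hi0 : 0 ≤ i := by
        rcases (PySem.List.mem_pyRange_iff_of_pos (by norm_num : (0:Int) < 8) i).mp hi
          with ⟨h1, _, _⟩
        exact h1
      simp only [Function.comp_apply]
      congr 1
      have e1 : PySem.List.slice data (some (i + 8)) (some (i + 8 + 8))
          = (data.drop (i + 8).toNat).take ((i + 8 + 8).toNat - (i + 8).toNat) :=
        PySem.List.slice_toNat data (by omega) (by omega)
      have e2 : PySem.List.slice (data.drop 8) (some i) (some (i + 8))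
          = ((data.drop 8).drop i.toNat).take ((i + 8).toNat - i.toNat) :=
        PySem.List.slice_toNat (data.drop 8) hi0 (by omega)
      have h2 : (i + 8 + 8).toNat - (i + 8).toNat = 8 := by omega
      have h3 : (i + 8).toNat - i.toNat = 8 := by omega
      have h4 : (i + 8).toNat = i.toNat + 8 := by omega
      rw [e1, e2, List.drop_drop, h2, h3, h4]
      rw [Nat.add_comm i.toNat 8]
    rw [hfc]
    have hrec := pvHits_eq key (data.drop 8) (pos + 8)
    have hlen : ((data.drop 8).length : Int) - 8 = (data.length : Int) - 8 - 8 := by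
      rw [List.length_drop]
      omega
    rw [hlen] at hrec
    by_cases hc : 2 < (data.take 8).count key
    · rw [if_pos hc, hrec]
      simp only [decide_eq_true_eq, if_pos hc, List.map_cons, List.map_map, add_zero]
      refine List.cons_eq_cons.mpr ⟨rfl, ?_⟩
      apply List.map_congr_left
      intro i _
      simp only [Function.comp_apply]
      ring
    · rw [if_neg hc, hrec]
      simp only [decide_eq_true_eq, if_neg hc, List.map_map]
      apply List.map_congr_left
      intro i _
      simp only [Function.comp_apply]
      ring
  · rw [dif_neg h]
    rw [PySem.List.pyRange_of_pos 0 ((data.length : Int) - 8) (by norm_num : (0:Int) < 8)]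
    rw [if_neg (by omega : ¬ (0:Int) < (data.length : Int) - 8)]
    simp
termination_by data.length
decreasing_by all_goals simp; omega

-- ===== VERDICT (by name: the statement is the Claim_ definition above) =====
theorem StatisticalSearch_spec : Claim_equal_StatisticalSearch := by
  intro data key _
  unfold Spec_StatisticalSearch StatisticalSearch StatisticalSearch_alt
  rw [SSloop_eq, pvHits_eq]
  simp only [zero_add, List.map_id']
  cases hhs : (PySem.List.pyRange 0 ((data.length : Int) - 8) 8).filter
      (fun i => decide (2 < PySem.List.count
        (PySem.List.slice data (some i) (some (i + 8))) key)) with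
  | nil => simp [pvCombine]
  | cons h t => simp [pvCombine]
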